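-- pv_equiv track=rewrite | github.com/aeghnnsw/TopMT | src/pbdd/post_processing/mol_search.py | find_n_ring
-- ===== SOURCE A (Python) =====
-- def find_n_ring(pairs,i,j,n):
--     paths = [[i]]
--     for k in range(n-1):
--         paths_new = list()
--         for path in paths:
--             neighbors = find_nearest_neighbor(pairs,path[-1])
--             for neighbor in neighbors:
--                 if neighbor not in path:
--                     paths_new.append(path+[neighbor])
--         if len(paths_new)==0:
--             return paths_new
--         paths = paths_new
--     rings = list()
--     for path in paths:
--         if path[-1]==j:
--             rings.append(path)
--     return rings
--
-- def find_nearest_neighbor(pairs,i):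
--     neighbors = list()
--     if len(pairs)==0:
--         return neighbors
--     for pair in pairs:
--         m,n = pair
--         if m==i:
--             neighbors.append(n)
--         if n==i:
--             neighbors.append(m)
--     return neighbors
-- ===== SOURCE B (Python) =====
-- def find_n_ring(pairs, i, j, n):
--     # Recursive DFS path enumeration; neighbor scan inlined over pairs.
--     rings = []
--
--     def dfs(path):
--         if len(path) >= n:
--             if path[-1] == j:
--                 rings.append(path)
--             return
--         last = path[-1]
--         for (m, q) in pairs:
--             if m == last and q not in path:
--                 dfs(path + [q])
--             if q == last and m not in path:
--                 dfs(path + [m])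
--
--     dfs([i])
--     return rings
-- ===== Notes on version B (the rewrite author's own statement) =====
-- stated objective: alternative
-- what changed: Replaces A's level-by-level BFS (rebuilding a full list of paths per level via a separate neighbor-list helper, then a final endpoint filter) with a recursive depth-first enumeration that inlines the pair scan and tests the j-endpoint only at full-length leaves.
import Mathlib
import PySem

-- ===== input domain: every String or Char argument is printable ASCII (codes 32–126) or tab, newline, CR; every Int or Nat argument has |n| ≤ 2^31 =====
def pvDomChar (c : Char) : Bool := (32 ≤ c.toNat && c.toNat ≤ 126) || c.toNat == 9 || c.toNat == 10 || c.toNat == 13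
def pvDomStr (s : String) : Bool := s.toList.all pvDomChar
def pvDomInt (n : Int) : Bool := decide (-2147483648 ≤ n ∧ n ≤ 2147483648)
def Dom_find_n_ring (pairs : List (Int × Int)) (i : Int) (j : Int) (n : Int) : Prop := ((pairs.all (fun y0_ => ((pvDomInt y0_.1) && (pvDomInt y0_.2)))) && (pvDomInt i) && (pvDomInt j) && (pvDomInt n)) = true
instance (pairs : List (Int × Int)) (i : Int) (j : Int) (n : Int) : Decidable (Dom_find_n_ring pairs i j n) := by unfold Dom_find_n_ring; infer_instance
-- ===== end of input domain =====

-- B is a recursive depth-first enumeration with the pair scan inlined, instead of A's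
-- level-by-level BFS with a separate neighbor-list helper and a final endpoint filter (objective: alternative).

-- path[-1]: exact for nonempty lists; every path in either algorithm is nonempty (starts at [i])
def pvLast (p : List Int) : Int := (PySem.List.pyGet? p (-1)).getD 0

-- ===== PORT A =====
-- find_nearest_neighbor(pairs, i)
def find_nearest_neighbor (pairs : List (Int × Int)) (i : Int) : List Int :=
  if pairs.length = 0 then []
  else pairs.foldl (fun acc pr =>
    let acc := if pr.1 = i then acc ++ [pr.2] else acc
    if pr.2 = i then acc ++ [pr.1] else acc) []

-- the body of `for k in range(n-1)` with the early `return paths_new` (as the [] it returns),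
-- followed by the final ring filter when the loop ends
def findLoopA (pairs : List (Int × Int)) (j : Int) : Nat → List (List Int) → List (List Int)
  | 0, paths => paths.foldl (fun rings path => if pvLast path = j then rings ++ [path] else rings) []
  | k+1, paths =>
      let paths_new := paths.foldl (fun acc path =>
        (find_nearest_neighbor pairs (pvLast path)).foldl
          (fun acc2 nb => if nb ∉ path then acc2 ++ [path ++ [nb]] else acc2) acc) []
      if paths_new.length = 0 then paths_new else findLoopA pairs j k paths_new

def find_n_ring (pairs : List (Int × Int)) (i : Int) (j : Int) (n : Int) : List (List Int) :=
  findLoopA pairs j (n - 1).toNat [[i]]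

-- ===== PORT B =====
-- dfs(path): the remaining depth n - len(path) is carried as a Nat; rings returned, not mutated
def dfsB (pairs : List (Int × Int)) (j : Int) : Nat → List Int → List (List Int)
  | 0, path => if pvLast path = j then [path] else []
  | k+1, path =>
      pairs.foldl (fun acc pr =>
        let acc := if pr.1 = pvLast path ∧ pr.2 ∉ path then acc ++ dfsB pairs j k (path ++ [pr.2]) else acc
        if pr.2 = pvLast path ∧ pr.1 ∉ path then acc ++ dfsB pairs j k (path ++ [pr.1]) else acc) []

def find_n_ring_alt (pairs : List (Int × Int)) (i : Int) (j : Int) (n : Int) : List (List Int) :=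
  dfsB pairs j (n - 1).toNat [i]

-- ===== PRECONDITION & SPEC =====
def Spec_find_n_ring (pairs : List (Int × Int)) (i : Int) (j : Int) (n : Int) (out : List (List Int)) : Prop := out = find_n_ring_alt pairs i j n
instance (pairs : List (Int × Int)) (i : Int) (j : Int) (n : Int) (out : List (List Int)) : Decidable (Spec_find_n_ring pairs i j n out) := by unfold Spec_find_n_ring; infer_instance

-- ===== CLAIM (what is proved, stated in full; the proofs are below) =====
def Claim_equal_find_n_ring : Prop := ∀ (pairs : List (Int × Int)) (i : Int) (j : Int) (n : Int), Dom_find_n_ring pairs i j n → Spec_find_n_ring pairs i j n (find_n_ring pairs i j n)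

-- ===== LEMMAS AND PROOFS =====

-- the four accumulator folds, each rewritten as a flatMap
theorem fold_nb (pairs : List (Int × Int)) (i : Int) (a : List Int) :
    pairs.foldl (fun acc pr =>
      let acc := if pr.1 = i then acc ++ [pr.2] else acc
      if pr.2 = i then acc ++ [pr.1] else acc) a
    = a ++ pairs.flatMap (fun pr => (if pr.1 = i then [pr.2] else []) ++ (if pr.2 = i then [pr.1] else [])) := by
  induction pairs generalizing a with
  | nil => simp
  | cons p t ih => simp only [List.foldl_cons, List.flatMap_cons, ih]; split_ifs <;> simp

theorem neighbors_eq (pairs : List (Int × Int)) (i : Int) :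
    find_nearest_neighbor pairs i
    = pairs.flatMap (fun pr => (if pr.1 = i then [pr.2] else []) ++ (if pr.2 = i then [pr.1] else [])) := by
  unfold find_nearest_neighbor
  split
  · rename_i h; rw [List.length_eq_zero_iff] at h; simp [h]
  · exact fold_nb pairs i []

def childrenA (pairs : List (Int × Int)) (path : List Int) : List (List Int) :=
  (find_nearest_neighbor pairs (pvLast path)).flatMap
    (fun nb => if nb ∉ path then [path ++ [nb]] else [])

theorem fold_child (path : List Int) (nbs : List Int) (a : List (List Int)) :
    nbs.foldl (fun acc2 nb => if nb ∉ path then acc2 ++ [path ++ [nb]] else acc2) a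
    = a ++ nbs.flatMap (fun nb => if nb ∉ path then [path ++ [nb]] else []) := by
  induction nbs generalizing a with
  | nil => simp
  | cons x t ih => simp only [List.foldl_cons, List.flatMap_cons, ih]; split_ifs <;> simp

theorem fold_new (pairs : List (Int × Int)) (paths : List (List Int)) (a : List (List Int)) :
    paths.foldl (fun acc path =>
      (find_nearest_neighbor pairs (pvLast path)).foldl
        (fun acc2 nb => if nb ∉ path then acc2 ++ [path ++ [nb]] else acc2) acc) a
    = a ++ paths.flatMap (childrenA pairs) := by
  induction paths generalizing a with
  | nil => simp
  | cons p t ih =>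
      rw [List.foldl_cons, fold_child, ih, List.flatMap_cons, childrenA, List.append_assoc]

theorem fold_rings (j : Int) (paths : List (List Int)) (a : List (List Int)) :
    paths.foldl (fun rings path => if pvLast path = j then rings ++ [path] else rings) a
    = a ++ paths.flatMap (fun path => if pvLast path = j then [path] else []) := by
  induction paths generalizing a with
  | nil => simp
  | cons p t ih => simp only [List.foldl_cons, List.flatMap_cons, ih]; split_ifs <;> simp

theorem fold_dfs (pairs : List (Int × Int)) (j : Int) (k : Nat) (path : List Int)
    (l : List (Int × Int)) (a : List (List Int)) :
    l.foldl (fun acc pr =>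
      let acc := if pr.1 = pvLast path ∧ pr.2 ∉ path then acc ++ dfsB pairs j k (path ++ [pr.2]) else acc
      if pr.2 = pvLast path ∧ pr.1 ∉ path then acc ++ dfsB pairs j k (path ++ [pr.1]) else acc) a
    = a ++ l.flatMap (fun pr =>
        (if pr.1 = pvLast path ∧ pr.2 ∉ path then dfsB pairs j k (path ++ [pr.2]) else []) ++
        (if pr.2 = pvLast path ∧ pr.1 ∉ path then dfsB pairs j k (path ++ [pr.1]) else [])) := by
  induction l generalizing a with
  | nil => simp
  | cons p t ih => simp only [List.foldl_cons, List.flatMap_cons, ih]; split_ifs <;> simp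

-- one DFS expansion step equals flatMap over A's children of the path
theorem dfs_succ (pairs : List (Int × Int)) (j : Int) (k : Nat) (path : List Int) :
    dfsB pairs j (k+1) path = (childrenA pairs path).flatMap (dfsB pairs j k) := by
  rw [dfsB, fold_dfs, childrenA, neighbors_eq, List.flatMap_assoc, List.flatMap_assoc]
  simp only [List.nil_append]
  refine List.flatMap_congr fun pr _ => ?_
  by_cases h1 : pr.1 = pvLast path <;> by_cases h2 : pr.2 = pvLast path <;>
    simp [h1, h2] <;> split_ifs <;> simp

-- the BFS loop over any frontier equals the concatenation of the DFS results
theorem loop_eq (pairs : List (Int × Int)) (j : Int) (k : Nat) (paths : List (List Int)) :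
    findLoopA pairs j k paths = paths.flatMap (dfsB pairs j k) := by
  induction k generalizing paths with
  | zero =>
      rw [findLoopA, fold_rings]
      simp only [List.nil_append]
      apply List.flatMap_congr; intro p _; rw [dfsB]
  | succ k ih =>
      rw [findLoopA]
      simp only [fold_new, List.nil_append]
      have h2 : (paths.flatMap (childrenA pairs)).flatMap (dfsB pairs j k)
          = paths.flatMap (dfsB pairs j (k+1)) := by
        rw [List.flatMap_assoc]
        exact List.flatMap_congr (fun p _ => (dfs_succ pairs j k p).symm)
      split
      · rename_i h; rw [List.length_eq_zero_iff] at h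
        rw [← h2, h]; simp
      · rw [ih, h2]

-- ===== VERDICT (by name: the statement is the Claim_ definition above) =====
theorem find_n_ring_spec : Claim_equal_find_n_ring := by
  intro pairs i j n _
  show find_n_ring pairs i j n = find_n_ring_alt pairs i j n
  rw [find_n_ring, find_n_ring_alt, loop_eq]
  simp
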